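-- pv_equiv track=rewrite | github.com/pypi-data/pypi-mirror-315 | packages/pyehm/pyehm-1.4.tar.gz/pyehm-1.4/docs/examples/ehm_vs_ehm2_vs_jpda.py | is_valid_hyp
-- ===== SOURCE A (Python) =====
-- def is_valid_hyp(joint_hyp):
--     used_detections = set()
--     for hyp in joint_hyp:
--         detection = hyp[1]
--         if not detection:
--             pass
--         elif detection in used_detections:
--             return False
--         else:
--             used_detections.add(detection)
--     return True
-- ===== SOURCE B (Python) =====
-- def is_valid_hyp(joint_hyp):
--     detections = [hyp[1] for hyp in joint_hyp if hyp[1]]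
--     return len(detections) == len(set(detections))
-- ===== Notes on version B (the rewrite author's own statement) =====
-- stated objective: simpler
-- what changed: B builds the full list of truthy detections with one comprehension and decides uniqueness by comparing its length to the deduplicated set's length, instead of A's stateful loop with a running set, per-element membership branches and early False return.
import Mathlib
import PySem

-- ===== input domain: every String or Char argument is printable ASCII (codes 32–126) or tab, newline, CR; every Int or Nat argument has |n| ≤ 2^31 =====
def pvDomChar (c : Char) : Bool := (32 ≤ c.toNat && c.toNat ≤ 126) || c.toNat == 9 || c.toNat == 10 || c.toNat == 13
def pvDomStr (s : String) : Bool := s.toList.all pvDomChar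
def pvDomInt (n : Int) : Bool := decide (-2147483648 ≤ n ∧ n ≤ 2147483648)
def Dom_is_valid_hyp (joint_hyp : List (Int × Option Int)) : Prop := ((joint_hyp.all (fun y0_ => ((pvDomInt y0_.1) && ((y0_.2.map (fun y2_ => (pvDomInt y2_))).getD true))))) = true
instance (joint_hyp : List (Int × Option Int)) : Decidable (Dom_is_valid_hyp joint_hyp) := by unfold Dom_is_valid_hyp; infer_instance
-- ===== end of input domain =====

-- B is a simpler decomposition: one comprehension collecting the truthy detections,
-- then a length-vs-deduplicated-length comparison, instead of A's stateful early-exit loop.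

-- Python truthiness of an Optional[int]: None and 0 are falsy (exact on this type)
def optIntTruthy (d : Option Int) : Bool :=
  match d with
  | none => false
  | some v => v != 0

-- ===== PORT A =====
def isValidHypLoop (used : PySem.Set (Option Int)) : List (Int × Option Int) → Bool
  | [] => true
  | hyp :: rest =>
    if !optIntTruthy hyp.2 then isValidHypLoop used rest
    else if PySem.Set.contains used hyp.2 then false
    else isValidHypLoop (PySem.Set.add used hyp.2) rest

def is_valid_hyp (joint_hyp : List (Int × Option Int)) : Bool :=
  isValidHypLoop PySem.Set.empty joint_hyp

-- ===== PORT B =====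
def is_valid_hyp_alt (joint_hyp : List (Int × Option Int)) : Bool :=
  let detections := (joint_hyp.map Prod.snd).filter optIntTruthy
  detections.length == (PySem.Set.ofList detections).length


-- ===== PRECONDITION & SPEC =====
def Spec_is_valid_hyp (joint_hyp : List (Int × Option Int)) (out : Bool) : Prop := out = is_valid_hyp_alt joint_hyp
instance (joint_hyp : List (Int × Option Int)) (out : Bool) : Decidable (Spec_is_valid_hyp joint_hyp out) := by unfold Spec_is_valid_hyp; infer_instance

-- ===== CLAIM (what is proved, stated in full; the proofs are below) =====
def Claim_equal_is_valid_hyp : Prop := ∀ (joint_hyp : List (Int × Option Int)), Dom_is_valid_hyp joint_hyp → Spec_is_valid_hyp joint_hyp (is_valid_hyp joint_hyp)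

-- ===== LEMMAS AND PROOFS =====

theorem length_set_add_le {α : Type} [BEq α] (s : PySem.Set α) (x : α) :
    (PySem.Set.add s x).length ≤ s.length + 1 := by
  simp only [PySem.Set.add]
  split <;> simp

theorem length_set_add_of_contains {α : Type} [BEq α] (s : PySem.Set α) (x : α)
    (h : PySem.Set.contains s x = true) : (PySem.Set.add s x).length = s.length := by
  simp only [PySem.Set.add, PySem.Set.contains] at *
  simp [h]

theorem length_set_add_of_not_contains {α : Type} [BEq α] (s : PySem.Set α) (x : α)
    (h : PySem.Set.contains s x = false) : (PySem.Set.add s x).length = s.length + 1 := by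
  simp only [PySem.Set.add, PySem.Set.contains] at *
  simp [h]

theorem length_foldl_add_le {α : Type} [BEq α] (l : List α) (s : PySem.Set α) :
    (l.foldl PySem.Set.add s).length ≤ s.length + l.length := by
  induction l generalizing s with
  | nil => simp
  | cons x xs ih =>
    simp only [List.foldl_cons, List.length_cons]
    calc ((xs.foldl PySem.Set.add (PySem.Set.add s x)).length)
        ≤ (PySem.Set.add s x).length + xs.length := ih _
      _ ≤ s.length + (xs.length + 1) := by
          have := length_set_add_le s x; omega

-- A's early-exit loop, characterised by a pure length count over the truthy detections
theorem isValidHypLoop_eq (joint_hyp : List (Int × Option Int)) :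
    ∀ (s : PySem.Set (Option Int)),
      isValidHypLoop s joint_hyp =
        (s.length + ((joint_hyp.map Prod.snd).filter optIntTruthy).length ==
          (((joint_hyp.map Prod.snd).filter optIntTruthy).foldl PySem.Set.add s).length) := by
  induction joint_hyp with
  | nil => intro s; simp [isValidHypLoop]
  | cons hyp rest ih =>
    intro s
    simp only [isValidHypLoop, List.map_cons]
    by_cases ht : optIntTruthy hyp.2 = true
    · rw [List.filter_cons_of_pos ht]
      simp only [ht, Bool.not_true, Bool.false_eq_true, if_false]
      by_cases hc : PySem.Set.contains s hyp.2 = true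
      · simp only [hc, if_true]
        have hlen : (PySem.Set.add s hyp.2).length = s.length :=
          length_set_add_of_contains s hyp.2 hc
        have hle := length_foldl_add_le
          ((rest.map Prod.snd).filter optIntTruthy) (PySem.Set.add s hyp.2)
        rw [hlen] at hle
        simp only [List.foldl_cons, List.length_cons]
        symm
        simp only [beq_eq_false_iff_ne, ne_eq]
        omega
      · have hcf : PySem.Set.contains s hyp.2 = false := by
          cases h : PySem.Set.contains s hyp.2
          · rfl
          · exact absurd h hc
        simp only [hcf, Bool.false_eq_true, if_false]
        rw [ih (PySem.Set.add s hyp.2)]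
        have hlen : (PySem.Set.add s hyp.2).length = s.length + 1 :=
          length_set_add_of_not_contains s hyp.2 hcf
        rw [hlen]
        simp only [List.foldl_cons, List.length_cons]
        congr 1
        omega
    · have hf : optIntTruthy hyp.2 = false := by
        cases h : optIntTruthy hyp.2
        · rfl
        · exact absurd h ht
      rw [List.filter_cons_of_neg (by simp [hf])]
      simp only [hf, Bool.not_false, if_true]
      exact ih s

-- ===== VERDICT (by name: the statement is the Claim_ definition above) =====
theorem is_valid_hyp_spec : Claim_equal_is_valid_hyp := by
  intro joint_hyp _
  unfold Spec_is_valid_hyp is_valid_hyp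
  show _ = (((joint_hyp.map Prod.snd).filter optIntTruthy).length ==
    (PySem.Set.ofList ((joint_hyp.map Prod.snd).filter optIntTruthy)).length)
  rw [isValidHypLoop_eq joint_hyp PySem.Set.empty, PySem.Set.ofList_eq_foldl]
  simp [PySem.Set.empty]
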